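-- pv_equiv track=rewrite | github.com/ndiayeoumar/Cellular_Metabolic_Profiler | cellmetpro/core/compass.py | _split_at_operator
-- ===== SOURCE A (Python) =====
-- def _split_at_operator(rule: str, operator: str) -> list[str]:
--     """Split GPR rule at operator, respecting parentheses."""
--     parts = []
--     current = ""
--     depth = 0
--
--     i = 0
--     while i < len(rule):
--         if rule[i] == "(":
--             depth += 1
--             current += rule[i]
--         elif rule[i] == ")":
--             depth -= 1
--             current += rule[i]
--         elif depth == 0 and rule[i:].upper().startswith(operator):
--             if current.strip():
--                 parts.append(current.strip())
--             current = ""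
--             i += len(operator) - 1
--         else:
--             current += rule[i]
--         i += 1
--
--     if current.strip():
--         parts.append(current.strip())
--
--     return parts if len(parts) > 1 else [rule]
-- ===== SOURCE B (Python) =====
-- def _split_at_operator(rule: str, operator: str) -> list[str]:
--     """Split GPR rule at operator, respecting parentheses.
--
--     One uppercase pass + repeated str.find jumps between candidate operator
--     occurrences; parenthesis depth is carried as a running balance over the
--     skipped stretch, and pieces are sliced out of the original rule.
--     """
--     upper = rule.upper()
--     parts = []
--     seg = 0      # start of the current piece in rule
--     pos = 0      # scan position
--     depth = 0
--     while True:
--         p = upper.find(operator, pos)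
--         if p == -1:
--             break
--         skipped = rule[pos:p]
--         depth += skipped.count("(") - skipped.count(")")
--         ch = rule[p]
--         if depth == 0 and ch != "(" and ch != ")":
--             piece = rule[seg:p].strip()
--             if piece:
--                 parts.append(piece)
--             pos = p + len(operator)
--             seg = pos
--         else:
--             if ch == "(":
--                 depth += 1
--             elif ch == ")":
--                 depth -= 1
--             pos = p + 1
--     tail = rule[seg:].strip()
--     if tail:
--         parts.append(tail)
--     return parts if len(parts) > 1 else [rule]
-- ===== Notes on version B (the rewrite author's own statement) =====
-- stated objective: faster
-- what changed: A scans char by char and re-slices+re-uppercases the whole remaining suffix at every index to test for the operator; B uppercases the rule once, jumps between operator occurrences with str.find, carries the parenthesis balance over each skipped stretch via two slice counts, and slices the pieces out of the original rule.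
-- outside the precondition, e.g. on _split_at_operator('(a)', ''): A returns ['(a)'], B raises IndexError
import Mathlib
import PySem

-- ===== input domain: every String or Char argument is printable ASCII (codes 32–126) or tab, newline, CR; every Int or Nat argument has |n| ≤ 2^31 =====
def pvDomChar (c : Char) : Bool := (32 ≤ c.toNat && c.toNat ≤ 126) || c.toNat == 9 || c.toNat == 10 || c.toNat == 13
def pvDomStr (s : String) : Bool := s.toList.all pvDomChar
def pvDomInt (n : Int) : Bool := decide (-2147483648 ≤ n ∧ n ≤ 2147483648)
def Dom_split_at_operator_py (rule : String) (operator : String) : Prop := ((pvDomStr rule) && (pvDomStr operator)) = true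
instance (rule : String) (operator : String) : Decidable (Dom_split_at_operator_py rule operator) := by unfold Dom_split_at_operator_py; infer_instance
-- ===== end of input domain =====

-- B replaces A's quadratic char-by-char scan (which re-slices and re-uppercases the whole
-- suffix at every index) by one upper() pass and str.find jumps between candidate operator
-- occurrences, carrying the parenthesis balance over each skipped stretch and slicing the
-- pieces out of the original rule; equivalence of return values is proved on Pre_ (operator ≠ "").

-- ===== PORT A =====
-- while-loop of A; fuel only makes the recursion total (one unit per iteration,
-- cs.length + 1 suffices whenever operator ≠ "", i.e. on all of Pre_).
def pvLoopA (cs op : List Char) : Nat → Nat → List Char → List (List Char) → Int → List (List Char)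
  | 0, _, current, parts, _ =>
      parts ++ (if PySem.Chars.strip current = [] then [] else [PySem.Chars.strip current])
  | fuel+1, i, current, parts, depth =>
    if h : i < cs.length then
      if cs[i] = '(' then
        pvLoopA cs op fuel (i+1) (current ++ [cs[i]]) parts (depth+1)
      else if cs[i] = ')' then
        pvLoopA cs op fuel (i+1) (current ++ [cs[i]]) parts (depth-1)
      else if depth = 0 ∧ PySem.Chars.startswith (PySem.Chars.upper (cs.drop i)) op then
        -- rule[i:] is cs.drop i (slice with start i, no stop)
        pvLoopA cs op fuel (i + op.length) []
          (parts ++ (if PySem.Chars.strip current = [] then [] else [PySem.Chars.strip current])) depth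
      else
        pvLoopA cs op fuel (i+1) (current ++ [cs[i]]) parts depth
    else
      -- loop exit: trailing 'if current.strip(): parts.append(current.strip())'
      parts ++ (if PySem.Chars.strip current = [] then [] else [PySem.Chars.strip current])

def split_at_operator_py (rule : String) (operator : String) : List String :=
  -- 'return parts if len(parts) > 1 else [rule]'
  if 1 < (pvLoopA rule.toList operator.toList (rule.toList.length + 1) 0 [] [] 0).length then
    (pvLoopA rule.toList operator.toList (rule.toList.length + 1) 0 [] [] 0).map String.ofList
  else [rule]

-- ===== PORT B =====
-- while-loop of Source B; fuel only makes the recursion total (one unit per find-candidate,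
-- cs.length + 1 suffices whenever operator ≠ "", i.e. on all of Pre_).
def pvLoopB (cs op up : List Char) : Nat → Nat → Nat → Int → List (List Char) → List (List Char)
  | 0, _, seg, _, parts =>
      parts ++ (if PySem.Chars.strip (cs.drop seg) = [] then [] else [PySem.Chars.strip (cs.drop seg)])
  | fuel+1, pos, seg, depth, parts =>
    let p := PySem.Chars.findFrom up op (pos : Int)
    if p = -1 then
      -- break; then 'tail = rule[seg:].strip(); if tail: parts.append(tail)'
      parts ++ (if PySem.Chars.strip (cs.drop seg) = [] then [] else [PySem.Chars.strip (cs.drop seg)])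
    else
      let skipped := PySem.List.slice cs (some (pos : Int)) (some p)
      let depth1 := depth + (PySem.Chars.count skipped ['('] : Int) - (PySem.Chars.count skipped [')'] : Int)
      -- ch = rule[p]; exact: 0 ≤ p < len(rule) holds whenever operator ≠ "" (all of Pre_)
      let c := cs.getD p.toNat ' '
      if depth1 = 0 ∧ c ≠ '(' ∧ c ≠ ')' then
        let piece := PySem.Chars.strip (PySem.List.slice cs (some (seg : Int)) (some p))
        pvLoopB cs op up fuel (p.toNat + op.length) (p.toNat + op.length) depth1
          (parts ++ (if piece = [] then [] else [piece]))
      else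
        pvLoopB cs op up fuel (p.toNat + 1) seg
          (if c = '(' then depth1 + 1 else if c = ')' then depth1 - 1 else depth1) parts

def split_at_operator_py_alt (rule : String) (operator : String) : List String :=
  if 1 < (pvLoopB rule.toList operator.toList (PySem.Chars.upper rule.toList) (rule.toList.length + 1) 0 0 0 []).length then
    (pvLoopB rule.toList operator.toList (PySem.Chars.upper rule.toList) (rule.toList.length + 1) 0 0 0 []).map String.ofList
  else [rule]

-- ===== PRECONDITION & SPEC =====
-- Pre_ excludes the empty operator: there A loops forever on any rule with a top-level
-- non-parenthesis character, and returns only on degenerate paren-only rules, where B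
-- raises IndexError.
def Pre_split_at_operator_py (rule : String) (operator : String) : Prop := operator ≠ ""
instance (rule : String) (operator : String) : Decidable (Pre_split_at_operator_py rule operator) := by unfold Pre_split_at_operator_py; infer_instance
def pvWitness_split_at_operator_py : String × String := ("GeneA and (B or C)", " AND ")

def Spec_split_at_operator_py (rule : String) (operator : String) (out : List String) : Prop := out = split_at_operator_py_alt rule operator
instance (rule : String) (operator : String) (out : List String) : Decidable (Spec_split_at_operator_py rule operator out) := by unfold Spec_split_at_operator_py; infer_instance

-- ===== CLAIM (what is proved, stated in full; the proofs are below) =====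
def Claim_equal_split_at_operator_py : Prop := ∀ (rule : String) (operator : String), Dom_split_at_operator_py rule operator → Pre_split_at_operator_py rule operator → Spec_split_at_operator_py rule operator (split_at_operator_py rule operator)

-- ===== LEMMAS AND PROOFS =====

-- Python str.count of a single-character needle is List.count.
lemma pvGo_singleton (c : Char) : ∀ (fuel : Nat) (l : List Char) (acc : Nat), l.length ≤ fuel →
    PySem.Chars.count.go [c] fuel l acc = acc + l.count c := by
  intro fuel
  induction fuel with
  | zero => intro l acc h; cases l <;> simp_all [PySem.Chars.count.go]
  | succ f ih =>
    intro l acc h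
    cases l with
    | nil => simp [PySem.Chars.count.go]
    | cons a t =>
      simp only [PySem.Chars.count.go, List.isPrefixOf, List.count_cons]
      by_cases hc : c == a
      · simp only [hc, Bool.and_true]
        rw [show List.drop [c].length (a :: t) = t by simp]
        rw [ih t (acc+1) (by simpa using h)]
        simp_all [beq_iff_eq]
        omega
      · simp only [hc]
        rw [ih t acc (by simpa using h)]
        simp_all [beq_iff_eq]
        exact fun h' => hc h'.symm

lemma pvCount_singleton (l : List Char) (c : Char) : PySem.Chars.count l [c] = l.count c := by
  simp only [PySem.Chars.count, List.isEmpty]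
  rw [pvGo_singleton c l.length l 0 le_rfl]
  simp

lemma pvUpper_drop (cs : List Char) (i : Nat) :
    PySem.Chars.upper (cs.drop i) = (PySem.Chars.upper cs).drop i := by
  simp [PySem.Chars.upper, List.map_drop]

lemma pvTakeMerge (l : List Char) (s i k : Nat) (h : s ≤ i) :
    (l.drop s).take (i - s) ++ (l.drop i).take k = (l.drop s).take (i - s + k) := by
  rw [show l.drop i = (l.drop s).drop (i - s) from by rw [List.drop_drop]; congr 1; omega,
    ← List.take_add]

-- A's scan over a stretch [i, i+k) containing no operator occurrence: the buffer grows by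
-- that stretch and depth by its parenthesis balance, one fuel unit per character.
lemma pvWalkA (cs op : List Char) (k : Nat) :
    ∀ (i : Nat) (current : List Char) (parts : List (List Char)) (depth : Int) (fuel : Nat),
      (∀ j, i ≤ j → j < i + k → ¬ op <+: (PySem.Chars.upper cs).drop j) →
      i + k ≤ cs.length → k < fuel →
      pvLoopA cs op fuel i current parts depth =
      pvLoopA cs op (fuel - k) (i + k) (current ++ (cs.drop i).take k) parts
        (depth + (((cs.drop i).take k).count '(' : Int) - (((cs.drop i).take k).count ')' : Int)) := by
  induction k with
  | zero => intro i current parts depth fuel _ _ _; simp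
  | succ k ih =>
    intro i current parts depth fuel hnm hlen hfuel
    obtain ⟨f, rfl⟩ : ∃ f, fuel = f + 1 := ⟨fuel - 1, by omega⟩
    have hi : i < cs.length := by omega
    have hdrop : cs.drop i = cs[i] :: cs.drop (i+1) := List.drop_eq_getElem_cons hi
    have hcur : (cs.drop i).take (k+1) = cs[i] :: (cs.drop (i+1)).take k := by rw [hdrop, List.take_succ_cons]
    have hnm0 : ¬ op <+: (PySem.Chars.upper cs).drop i := hnm i le_rfl (by omega)
    have hcond : ¬ (depth = 0 ∧ PySem.Chars.startswith (PySem.Chars.upper (cs.drop i)) op = true) := by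
      rintro ⟨-, hs⟩
      rw [pvUpper_drop] at hs
      exact hnm0 ((PySem.Chars.startswith_iff _ _).mp hs)
    have hshift : ∀ j, i + 1 ≤ j → j < i + 1 + k → ¬ op <+: (PySem.Chars.upper cs).drop j :=
      fun j h1 h2 => hnm j (by omega) (by omega)
    simp only [pvLoopA, dif_pos hi]
    by_cases h1 : cs[i] = '('
    · rw [if_pos h1, ih (i+1) (current ++ [cs[i]]) parts (depth+1) f hshift (by omega) (by omega)]
      rw [hcur]
      congr 1
      · omega
      · omega
      · simp [List.append_assoc]
      · simp [h1]
        ring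
    · rw [if_neg h1]
      by_cases h2 : cs[i] = ')'
      · rw [if_pos h2, ih (i+1) (current ++ [cs[i]]) parts (depth-1) f hshift (by omega) (by omega)]
        rw [hcur]
        congr 1
        · omega
        · omega
        · simp [List.append_assoc]
        · simp [h2]
          ring
      · rw [if_neg h2, if_neg hcond,
          ih (i+1) (current ++ [cs[i]]) parts depth f hshift (by omega) (by omega)]
        rw [hcur]
        congr 1
        · omega
        · omega
        · simp [List.append_assoc]
        · simp [h1, h2]

-- main simulation: A from char position i with buffer rule[seg:i] equals B from pos = i.
lemma pvLoop_eq (cs op : List Char) (hop : op ≠ []) :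
    ∀ (fA : Nat), ∀ (fB i seg : Nat) (depth : Int) (parts : List (List Char)),
      seg ≤ i → i ≤ cs.length → cs.length - i < fA → cs.length - i < fB →
      pvLoopA cs op fA i ((cs.drop seg).take (i - seg)) parts depth =
      pvLoopB cs op (PySem.Chars.upper cs) fB i seg depth parts := by
  have hopl : 1 ≤ op.length := List.length_pos_iff.mpr hop
  have hlup : (PySem.Chars.upper cs).length = cs.length := by
    simp [PySem.Chars.upper]
  intro fA
  induction fA using Nat.strong_induction_on with
  | _ fA IH =>
  intro fB i seg depth parts hsi hil hfA hfB
  obtain ⟨a, rfl⟩ : ∃ a, fA = a + 1 := ⟨fA - 1, by omega⟩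
  obtain ⟨b, rfl⟩ : ∃ b, fB = b + 1 := ⟨fB - 1, by omega⟩
  have hile : i ≤ (PySem.Chars.upper cs).length := by omega
  by_cases hp : PySem.Chars.findFrom (PySem.Chars.upper cs) op (i : Int) = -1
  · -- no further occurrence: A walks to the end, B breaks
    have hno : ∀ j, i ≤ j → ¬ op <+: (PySem.Chars.upper cs).drop j := by
      intro j hj hpre
      have hinfix : ¬ op <:+: (PySem.Chars.upper cs).drop i :=
        (PySem.Chars.findFrom_natCast_eq_neg_one_iff _ _ i hile).mp hp
      apply hinfix
      have hdd : ((PySem.Chars.upper cs).drop i).drop (j - i) = (PySem.Chars.upper cs).drop j := by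
        rw [List.drop_drop]; congr 1; omega
      exact hpre.isInfix.trans (hdd ▸ List.drop_suffix (j - i) _).isInfix
    rw [pvWalkA cs op (cs.length - i) i _ parts depth _
      (fun j h1 _ => hno j h1) (by omega) (by omega)]
    have hfull : (cs.drop seg).take (i - seg) ++ (cs.drop i).take (cs.length - i) =
        cs.drop seg := by
      rw [show (cs.drop i).take (cs.length - i) = cs.drop i from
            List.take_of_length_le (by simp)]
      rw [show cs.drop i = (cs.drop seg).drop (i - seg) from by
            rw [List.drop_drop]; congr 1; omega]
      exact List.take_append_drop _ _
    obtain ⟨a', ha'⟩ : ∃ a', a + 1 - (cs.length - i) = a' + 1 := ⟨a - (cs.length - i), by omega⟩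
    rw [ha', hfull, show i + (cs.length - i) = cs.length from by omega]
    simp only [pvLoopA, pvLoopB]
    rw [if_pos hp, dif_neg (by omega)]
  · -- occurrence at q: A walks the no-match stretch [i, q), then both take the same branch
    obtain ⟨hip, hpref, hnomid⟩ := PySem.Chars.findFrom_natCast_spec _ op i hile hp
    obtain ⟨q, hq⟩ : ∃ qn : Nat, PySem.Chars.findFrom (PySem.Chars.upper cs) op (i : Int) = (qn : Int) :=
      ⟨_, (Int.toNat_of_nonneg (by omega)).symm⟩
    rw [hq] at hip hpref hnomid
    simp only [Int.toNat_natCast] at hpref hnomid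
    have hiq : i ≤ q := by exact_mod_cast hip
    have hqop : q + op.length ≤ cs.length := by
      have := hpref.length_le
      simp at this
      omega
    have hqlen : q < cs.length := by omega
    -- A walks the no-match stretch
    rw [pvWalkA cs op (q - i) i _ parts depth _
      (fun j h1 h2 => hnomid j h1 (by omega)) (by omega) (by omega)]
    rw [show i + (q - i) = q from by omega]
    obtain ⟨a', ha'⟩ : ∃ a', a + 1 - (q - i) = a' + 1 := ⟨a - (q - i), by omega⟩
    rw [ha']
    have ha'fa : a' < a + 1 := by omega
    -- buffer bookkeeping
    have hcurq : (cs.drop seg).take (i - seg) ++ (cs.drop i).take (q - i) =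
        (cs.drop seg).take (q - seg) := by
      rw [pvTakeMerge cs seg i (q - i) hsi]; congr 1; omega
    have hcurq1 : (cs.drop seg).take (q - seg) ++ [cs[q]] = (cs.drop seg).take (q + 1 - seg) := by
      rw [show [cs[q]] = (cs.drop q).take 1 from by rw [List.drop_eq_getElem_cons hqlen]; rfl]
      rw [pvTakeMerge cs seg q 1 (by omega)]; congr 1; omega
    have hsw : PySem.Chars.startswith (PySem.Chars.upper (cs.drop q)) op = true := by
      rw [pvUpper_drop]; exact (PySem.Chars.startswith_iff _ _).mpr hpref
    -- B's one iteration
    simp only [pvLoopB]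
    rw [hq, if_neg (by omega), Int.toNat_natCast,
      PySem.List.slice_natCast cs i q, PySem.List.slice_natCast cs seg q,
      List.getD_eq_getElem cs ' ' hqlen]
    simp only [pvCount_singleton]
    -- A's step at q
    simp only [pvLoopA]
    rw [dif_pos hqlen, hcurq]
    by_cases h1 : cs[q] = '('
    · rw [if_pos h1, if_neg (fun hcon => hcon.2.1 h1), if_pos h1, hcurq1]
      exact IH a' ha'fa b (q+1) seg _ parts (by omega) (by omega) (by omega) (by omega)
    · rw [if_neg h1]
      by_cases h2 : cs[q] = ')'
      · rw [if_pos h2, if_neg (fun hcon => hcon.2.2 h2), if_neg h1, if_pos h2, hcurq1]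
        exact IH a' ha'fa b (q+1) seg _ parts (by omega) (by omega) (by omega) (by omega)
      · by_cases hd : depth + ((((cs.drop i).take (q - i)).count '(' : Int))
            - (((cs.drop i).take (q - i)).count ')' : Int) = 0
        · rw [if_neg h2, if_pos (show _ ∧ _ from ⟨hd, hsw⟩), if_pos (show _ ∧ _ ∧ _ from ⟨hd, h1, h2⟩)]
          have := IH a' ha'fa b (q + op.length) (q + op.length)
            (depth + ((((cs.drop i).take (q - i)).count '(' : Int))
              - (((cs.drop i).take (q - i)).count ')' : Int))
            (parts ++ (if PySem.Chars.strip ((cs.drop seg).take (q - seg)) = [] then []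
              else [PySem.Chars.strip ((cs.drop seg).take (q - seg))]))
            (le_refl _) (by omega) (by omega) (by omega)
          simpa using this
        · have hnA : ¬ (depth + ((((cs.drop i).take (q - i)).count '(' : Int))
              - (((cs.drop i).take (q - i)).count ')' : Int) = 0 ∧
              PySem.Chars.startswith (PySem.Chars.upper (cs.drop q)) op = true) :=
            fun hcon => hd hcon.1
          have hnB : ¬ (depth + ((((cs.drop i).take (q - i)).count '(' : Int))
              - (((cs.drop i).take (q - i)).count ')' : Int) = 0 ∧
              cs[q] ≠ '(' ∧ cs[q] ≠ ')') :=
            fun hcon => hd hcon.1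
          rw [if_neg h2, if_neg hnA, if_neg hnB, if_neg h1, if_neg h2, hcurq1]
          exact IH a' ha'fa b (q+1) seg _ parts (by omega) (by omega) (by omega) (by omega)

-- ===== VERDICT (by name: the statement is the Claim_ definition above) =====
theorem split_at_operator_py_spec : Claim_equal_split_at_operator_py := by
  intro rule operator _ hpre
  unfold Spec_split_at_operator_py split_at_operator_py split_at_operator_py_alt
  have hop : operator.toList ≠ [] := by
    intro h
    exact hpre (by cases operator with | _ s => cases s; simp_all)
  have := pvLoop_eq rule.toList operator.toList hop (rule.toList.length + 1)
    (rule.toList.length + 1) 0 0 0 [] (by omega) (by omega) (by omega) (by omega)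
  simp only [Nat.sub_zero, List.take_zero] at this
  rw [this]
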